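-- pv_equiv track=rewrite | github.com/Tomstaib/SEP_DMPG | VerteilteBerechnungen/util/nodes_for_composite.py | compute_tree_sizes
-- ===== SOURCE A (Python) =====
-- def compute_tree_sizes(num_replications: int) -> int:
--     if num_replications < 1000: # Aussume, that less than 1000 no tree ist needed
--         return 0
--
--     total_number_of_management_nodes = (num_replications // 1000)
--     management_nodes_per_level = 1
--     counter = 0
--
--     while management_nodes_per_level <= total_number_of_management_nodes:
--         management_nodes_per_level *= 2
--         counter += 1
--
--     return counter - 1  # Subtract 1 to get the correct number of levels
-- ===== SOURCE B (Python) =====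
-- def compute_tree_sizes(num_replications: int) -> int:
--     if num_replications < 1000:
--         return 0
--     return (num_replications // 1000).bit_length() - 1
-- ===== Notes on version B (the rewrite author's own statement) =====
-- stated objective: idiomatic
-- what changed: Replaced the doubling while-loop and running counter with a closed-form bit_length computation on the quotient num_replications // 1000.
import Mathlib
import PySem

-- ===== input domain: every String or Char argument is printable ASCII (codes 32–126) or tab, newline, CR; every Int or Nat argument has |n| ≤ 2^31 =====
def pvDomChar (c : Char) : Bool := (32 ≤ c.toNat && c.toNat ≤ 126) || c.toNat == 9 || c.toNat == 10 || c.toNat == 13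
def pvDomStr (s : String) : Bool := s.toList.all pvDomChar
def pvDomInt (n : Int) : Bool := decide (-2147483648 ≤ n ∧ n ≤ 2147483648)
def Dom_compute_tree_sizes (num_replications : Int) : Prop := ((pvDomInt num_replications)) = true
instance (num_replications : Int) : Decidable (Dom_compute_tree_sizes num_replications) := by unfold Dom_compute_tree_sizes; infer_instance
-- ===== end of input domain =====

-- B replaces A's doubling while-loop with a closed-form bit_length computation (idiomatic).

-- ===== PORT A =====
-- the while-loop; m is always ≥ 1 (it starts at 1 and doubles), carried as a hypothesis for termination
def ctsLoop (t m c : Int) (hm : 1 ≤ m) : Int :=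
  if m ≤ t then ctsLoop t (m * 2) (c + 1) (by omega) else c
termination_by (t + 1 - m).toNat
decreasing_by omega

def compute_tree_sizes (num_replications : Int) : Int :=
  if num_replications < 1000 then 0
  else
    let total_number_of_management_nodes := PySem.Int.floordiv num_replications 1000
    ctsLoop total_number_of_management_nodes 1 0 (by omega) - 1

-- ===== PORT B =====
def compute_tree_sizes_alt (num_replications : Int) : Int :=
  if num_replications < 1000 then 0
  else (PySem.Int.bitLength (PySem.Int.floordiv num_replications 1000) : Int) - 1

-- ===== PRECONDITION & SPEC =====
def Spec_compute_tree_sizes (num_replications : Int) (out : Int) : Prop := out = compute_tree_sizes_alt num_replications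
instance (num_replications : Int) (out : Int) : Decidable (Spec_compute_tree_sizes num_replications out) := by unfold Spec_compute_tree_sizes; infer_instance

-- ===== CLAIM (what is proved, stated in full; the proofs are below) =====
def Claim_equal_compute_tree_sizes : Prop := ∀ (num_replications : Int), Dom_compute_tree_sizes num_replications → Spec_compute_tree_sizes num_replications (compute_tree_sizes num_replications)

-- ===== LEMMAS AND PROOFS =====

-- the loop, entered with m = 2^k, adds (bitLength t - k) to the counter while m ≤ t
theorem ctsLoop_eq (t : Int) (ht : 1 ≤ t) :
    ∀ (fuel : Nat) (m : Int) (k : Nat) (c : Int) (hm : 1 ≤ m),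
      m = 2^k → (t + 1 - m).toNat ≤ fuel →
      ctsLoop t m c hm =
        if m ≤ t then c + ((PySem.Int.bitLength t : Int) - k) else c := by
  intro fuel
  induction fuel with
  | zero =>
    intro m k c hm hk hfuel
    have hgt : ¬ (m ≤ t) := by omega
    rw [ctsLoop]
    simp [hgt]
  | succ f ih =>
    intro m k c hm hk hfuel
    rw [ctsLoop]
    by_cases h : m ≤ t
    · simp only [h, if_true]
      rw [ih (m*2) (k+1) (c+1) (by omega) (by rw [hk]; ring) (by omega)]
      by_cases h' : m * 2 ≤ t
      · simp [h']; ring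
      · -- 2^k ≤ t < 2^(k+1): bitLength t = k+1
        have hlow : 2^k ≤ t.natAbs := by
          have : ((2:Nat)^k : Int) ≤ t := by push_cast; omega
          omega
        have hhigh : t.natAbs < 2^(k+1) := by
          have h2 : m * 2 = ((2:Nat)^(k+1) : Int) := by push_cast; rw [hk]; ring
          omega
        have hbl : PySem.Int.bitLength t = k + 1 := by
          have h1 : t.natAbs < 2 ^ PySem.Int.bitLength t := PySem.Int.lt_two_pow_bitLength t
          have h2 : 2 ^ (PySem.Int.bitLength t - 1) ≤ t.natAbs :=
            PySem.Int.two_pow_bitLength_le t (by omega)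
          by_contra hne
          rcases Nat.lt_or_ge (PySem.Int.bitLength t) (k+1) with hlt | hge
          · have : (2:Nat) ^ PySem.Int.bitLength t ≤ 2 ^ k :=
              Nat.pow_le_pow_right (by norm_num) (by omega)
            omega
          · have hge' : k + 1 ≤ PySem.Int.bitLength t - 1 := by omega
            have : (2:Nat) ^ (k+1) ≤ 2 ^ (PySem.Int.bitLength t - 1) :=
              Nat.pow_le_pow_right (by norm_num) hge'
            omega
        simp [h', hbl]
    · simp [h]

-- ===== VERDICT (by name: the statement is the Claim_ definition above) =====
theorem compute_tree_sizes_spec : Claim_equal_compute_tree_sizes := by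
  intro n _
  unfold Spec_compute_tree_sizes compute_tree_sizes compute_tree_sizes_alt
  by_cases h : n < 1000
  · simp [h]
  · simp only [h, if_false]
    set t := PySem.Int.floordiv n 1000 with ht
    have ht1 : 1 ≤ t := by
      rw [ht, PySem.Int.floordiv_eq_ediv_of_pos (by norm_num)]
      omega
    have := ctsLoop_eq t ht1 (t + 1 - 1).toNat 1 0 0 (by norm_num) (by norm_num) (by omega)
    rw [this]
    simp [ht1]
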